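-- pv_equiv track=rewrite | github.com/xuefenghao5121/mhf-neuraloperator | experiments/run_tfno_mhf_final.py | _auto_generate_resolutions
-- ===== SOURCE A (Python) =====
-- from typing import Dict, Any, Tuple, List, Optional, Union, Literal
--
-- def _auto_generate_resolutions(n_modes: Tuple[int, ...]) -> List[int]:
--     """Auto-generate hierarchical resolutions based on n_modes"""
--     max_res = max(n_modes)
--     resolutions = []
--     current = 4
--     while current <= max_res:
--         resolutions.append(current)
--         current *= 2
--     if resolutions[-1] != max_res:
--         resolutions.append(max_res)
--     return resolutions
-- ===== SOURCE B (Python) =====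
-- def _auto_generate_resolutions(n_modes):
--     """Auto-generate hierarchical resolutions based on n_modes"""
--     max_res = max(n_modes)
--
--     def _down(c):
--         # recursively halve from the top power of two down to 4,
--         # building the list back-to-front
--         return [] if c < 4 else _down(c // 2) + [c]
--
--     top = 1 << (max_res.bit_length() - 1) if max_res > 0 else 0
--     resolutions = _down(top)
--     if resolutions[-1] != max_res:
--         resolutions.append(max_res)
--     return resolutions
-- ===== Notes on version B (the rewrite author's own statement) =====
-- stated objective: alternative
-- what changed: Replaces A's bottom-up iterative doubling loop with a recursive top-down halving: B computes the largest power of two <= max_res and a recursive helper halves it down to 4, building the list back-to-front, keeping the identical trailing max_res append.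
import Mathlib
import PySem

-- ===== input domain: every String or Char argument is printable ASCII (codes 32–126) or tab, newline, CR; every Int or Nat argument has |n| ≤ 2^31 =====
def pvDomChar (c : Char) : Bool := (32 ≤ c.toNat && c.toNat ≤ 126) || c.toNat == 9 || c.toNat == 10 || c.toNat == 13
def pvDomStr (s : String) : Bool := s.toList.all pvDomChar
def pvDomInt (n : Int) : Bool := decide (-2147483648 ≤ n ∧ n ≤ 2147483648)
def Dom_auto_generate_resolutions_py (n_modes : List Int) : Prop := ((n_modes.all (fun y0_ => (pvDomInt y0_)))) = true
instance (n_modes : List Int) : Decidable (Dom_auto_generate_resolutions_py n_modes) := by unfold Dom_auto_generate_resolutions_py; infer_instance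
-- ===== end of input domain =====

-- B replaces A's bottom-up iterative doubling with a recursive top-down halving from the
-- largest power of two ≤ max_res, building the list back-to-front; objective: alternative.

-- ===== PORT A =====
-- the 'while current <= max_res: append; current *= 2' loop (0 < current is a pure
-- totality guard: current is always 4·2^i > 0 on every reachable call)
def agrLoop (max_res current : Int) (acc : List Int) : List Int :=
  if _h : 0 < current ∧ current ≤ max_res then
    agrLoop max_res (current * 2) (acc ++ [current])
  else acc
termination_by (max_res - current + 1).toNat
decreasing_by omega

def auto_generate_resolutions_py (n_modes : List Int) : List Int :=
  match PySem.List.max? n_modes (fun x => x) with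
  | none => []          -- max([]) raises ValueError; excluded by Pre_
  | some max_res =>
    let resolutions := agrLoop max_res 4 []
    match PySem.List.pyGet? resolutions (-1) with
    | none => []        -- resolutions[-1] raises IndexError; excluded by Pre_
    | some last => if last ≠ max_res then resolutions ++ [max_res] else resolutions

-- ===== PORT B =====
-- Python int.bit_length (bits of |n|)
def pyBitLength (n : Int) : Int := (Nat.size n.natAbs : Int)

-- B's recursive helper _down: halve from c down to 4, building back-to-front
def agrDown (c : Int) : List Int :=
  if _h : 4 ≤ c then agrDown (PySem.Int.floordiv c 2) ++ [c] else []
termination_by c.toNat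
decreasing_by simp only [PySem.Int.floordiv, Int.fdiv_eq_ediv]; omega

def auto_generate_resolutions_py_alt (n_modes : List Int) : List Int :=
  match PySem.List.max? n_modes (fun x => x) with
  | none => []          -- max([]) raises ValueError; excluded by Pre_
  | some max_res =>
    let top : Int := if 0 < max_res then 2 ^ (pyBitLength max_res - 1).toNat else 0
    let resolutions := agrDown top
    match PySem.List.pyGet? resolutions (-1) with
    | none => []        -- resolutions[-1] raises IndexError; excluded by Pre_
    | some last => if last ≠ max_res then resolutions ++ [max_res] else resolutions

-- ===== PRECONDITION & SPEC =====
-- Pre_ excludes exactly the inputs where Python A raises: the empty list (ValueError from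
-- max) and lists whose maximum is < 4 (resolutions stays empty, so resolutions[-1] raises
-- IndexError).
def Pre_auto_generate_resolutions_py (n_modes : List Int) : Prop :=
  ∃ x ∈ n_modes, (4 : Int) ≤ x
instance (n_modes : List Int) : Decidable (Pre_auto_generate_resolutions_py n_modes) := by
  unfold Pre_auto_generate_resolutions_py; infer_instance

def pvWitness_auto_generate_resolutions_py : List Int := [12, 3]

def Spec_auto_generate_resolutions_py (n_modes : List Int) (out : List Int) : Prop := out = auto_generate_resolutions_py_alt n_modes
instance (n_modes : List Int) (out : List Int) : Decidable (Spec_auto_generate_resolutions_py n_modes out) := by unfold Spec_auto_generate_resolutions_py; infer_instance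

-- ===== CLAIM (what is proved, stated in full; the proofs are below) =====
def Claim_equal_auto_generate_resolutions_py : Prop := ∀ (n_modes : List Int), Dom_auto_generate_resolutions_py n_modes → Pre_auto_generate_resolutions_py n_modes → Spec_auto_generate_resolutions_py n_modes (auto_generate_resolutions_py n_modes)

-- ===== LEMMAS AND PROOFS =====

-- A's loop, started at current = 2^t, appends exactly the powers 2^t, …, the largest ≤ m.
theorem agrLoop_eq (n : Nat) : ∀ (m : Int) (t : Nat), Nat.size m.toNat - t = n →
    ∀ acc, agrLoop m ((2 : Int) ^ t) acc
      = acc ++ (List.range n).map (fun i => (2 : Int) ^ (t + i)) := by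
  induction n with
  | zero =>
    intro m t hn acc
    have hlt : ¬ ((2 : Int) ^ t ≤ m) := by
      intro hle
      have h2 : (2 : Int) ^ t = ((2 ^ t : Nat) : Int) := by push_cast; ring
      have hm : (2 : Nat) ^ t ≤ m.toNat := by omega
      have := Nat.lt_size.mpr hm
      omega
    rw [agrLoop]
    simp [hlt]
  | succ n ih =>
    intro m t hn acc
    have h2 : (2 : Int) ^ t = ((2 ^ t : Nat) : Int) := by push_cast; ring
    have hnat : (2 : Nat) ^ t ≤ m.toNat := Nat.lt_size.mp (by omega)
    have h1 : (1 : Nat) ≤ 2 ^ t := Nat.one_le_two_pow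
    have hle : (2 : Int) ^ t ≤ m := by omega
    have hpos : (0 : Int) < 2 ^ t := by positivity
    rw [agrLoop]
    simp only [hpos, hle, and_self, dite_true]
    have hdouble : (2 : Int) ^ t * 2 = 2 ^ (t + 1) := by ring
    rw [hdouble, ih m (t + 1) (by omega), List.range_succ_eq_map, List.append_assoc]
    congr 1
    simp only [List.map_cons, List.map_map, List.singleton_append, add_zero]
    congr 1
    apply List.map_congr_left
    intro i _
    simp only [Function.comp_apply]
    congr 1
    omega

-- B's halving recursion, started at 2^t (t ≥ 2), produces the same geometric list.
theorem agrDown_pow (t : Nat) (ht : 2 ≤ t) :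
    agrDown ((2 : Int) ^ t) = (List.range (t - 1)).map (fun i => (2 : Int) ^ (2 + i)) := by
  induction t with
  | zero => omega
  | succ n ih =>
    rcases Nat.lt_or_ge n 2 with h | h
    · have hn : n = 1 := by omega
      subst hn
      have e2 : agrDown 2 = [] := by rw [agrDown]; norm_num
      have e4 : PySem.Int.floordiv (4 : Int) 2 = 2 := by decide
      rw [show ((2 : Int) ^ (1 + 1)) = 4 by norm_num, agrDown]
      norm_num [e4, e2, List.range_succ]
    · have h4 : (4 : Int) ≤ 2 ^ (n + 1) := by
        calc (4 : Int) = 2 ^ 2 := by norm_num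
        _ ≤ 2 ^ (n + 1) := by
          apply pow_le_pow_right₀ (by norm_num) (by omega)
      rw [agrDown]
      simp only [h4, dite_true]
      have hhalf : PySem.Int.floordiv ((2 : Int) ^ (n + 1)) 2 = 2 ^ n := by
        simp only [PySem.Int.floordiv, pow_succ]
        rw [Int.mul_fdiv_cancel _ (by norm_num)]
      rw [hhalf, ih h]
      have hn1 : n + 1 - 1 = (n - 1) + 1 := by omega
      rw [hn1, List.range_succ, List.map_append]
      congr 2
      simp only [List.map_nil]
      congr 1
      omega

-- With 4 ≤ m the two resolution lists coincide.
theorem lists_eq (m : Int) (h4 : (4 : Int) ≤ m) :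
    agrLoop m 4 []
      = agrDown (if 0 < m then (2 : Int) ^ (pyBitLength m - 1).toNat else 0) := by
  have habs : m.natAbs = m.toNat := by omega
  have hsz : 3 ≤ Nat.size m.toNat := Nat.lt_size.mpr (by omega)
  have hpos : (0 : Int) < m := by omega
  have htop : (pyBitLength m - 1).toNat = Nat.size m.toNat - 1 := by
    unfold pyBitLength
    rw [habs]
    omega
  have h4eq : (4 : Int) = 2 ^ 2 := by norm_num
  rw [if_pos hpos, htop, agrDown_pow (Nat.size m.toNat - 1) (by omega),
    h4eq, agrLoop_eq (Nat.size m.toNat - 2) m 2 rfl []]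
  simp only [List.nil_append]
  have hrange : Nat.size m.toNat - 1 - 1 = Nat.size m.toNat - 2 := by omega
  rw [hrange]

-- ===== VERDICT (by name: the statement is the Claim_ definition above) =====
theorem auto_generate_resolutions_py_spec : Claim_equal_auto_generate_resolutions_py := by
  intro n_modes _ hpre
  obtain ⟨x, hx, h4x⟩ := hpre
  unfold Spec_auto_generate_resolutions_py
  unfold auto_generate_resolutions_py auto_generate_resolutions_py_alt
  cases hmax : PySem.List.max? n_modes (fun x => x) with
  | none =>
    exact absurd ((PySem.List.max?_eq_none_iff _ _).mp hmax ▸ hx) (List.not_mem_nil)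
  | some m =>
    have h4m : (4 : Int) ≤ m := le_trans h4x (PySem.List.max?_isMax hmax x hx)
    simp only [lists_eq m h4m]
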